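-- pv_equiv track=rewrite | github.com/Kpassionate/UtilityGadgets | 面试/mianshi_review.py | for_wine
-- ===== SOURCE A (Python) =====
-- def for_wine(sum, wine, bottle, lid):
--     if wine == 0 and bottle // 2 == 0 and lid // 4 == 0:  # 终止条件
--         return sum
--     elif wine != 0:  # 消耗酒
--         sum += wine
--         return for_wine(sum, 0, bottle + wine, lid + wine)
--     elif bottle // 2 != 0:  # 瓶兑酒
--         wine += bottle // 2
--         return for_wine(sum, wine, bottle % 2, lid)
--     else:
--         wine += lid // 4  # 瓶盖兑酒
--         return for_wine(sum, wine, bottle, lid % 4)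
-- ===== SOURCE B (Python) =====
-- def _done(state):
--     _, wine, bottle, lid = state
--     return wine == 0 and bottle // 2 == 0 and lid // 4 == 0
--
--
-- def _step(state):
--     sum, wine, bottle, lid = state
--     if wine != 0:  # drink the wine
--         return (sum + wine, 0, bottle + wine, lid + wine)
--     if bottle // 2 != 0:  # bottles for wine
--         return (sum, wine + bottle // 2, bottle % 2, lid)
--     return (sum, wine + lid // 4, bottle, lid % 4)  # lids for wine
--
--
-- def for_wine(sum, wine, bottle, lid):
--     state = (sum, wine, bottle, lid)
--     while not _done(state):
--         state = _step(state)
--     return state[0]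
-- ===== Notes on version B (the rewrite author's own statement) =====
-- stated objective: idiomatic
-- what changed: Replaces the self-recursive simulation by an explicit state machine: a step function and a done test over a single state tuple, iterated with a while loop (no recursion, so no Python recursion-depth limit).
import Mathlib
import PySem

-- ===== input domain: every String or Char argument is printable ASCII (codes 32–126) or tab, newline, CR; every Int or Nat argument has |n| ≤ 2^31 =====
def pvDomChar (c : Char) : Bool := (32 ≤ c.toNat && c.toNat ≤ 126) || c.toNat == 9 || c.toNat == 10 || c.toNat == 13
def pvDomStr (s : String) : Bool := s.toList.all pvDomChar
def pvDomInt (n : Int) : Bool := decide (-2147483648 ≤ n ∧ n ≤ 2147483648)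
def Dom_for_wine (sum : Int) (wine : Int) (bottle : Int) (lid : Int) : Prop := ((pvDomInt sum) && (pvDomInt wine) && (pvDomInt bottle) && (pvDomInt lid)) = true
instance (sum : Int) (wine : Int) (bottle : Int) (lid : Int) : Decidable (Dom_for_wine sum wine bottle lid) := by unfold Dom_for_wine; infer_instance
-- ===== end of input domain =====

-- B runs the same exchange process as an explicit state machine (done test + step
-- function iterated by a while loop) instead of self-recursion.

-- Both Pythons loop until the drink/exchange process reaches a dead state; the
-- ports carry a fuel counter that merely makes that same computation total
-- (empirically the process needs far fewer steps than this fuel on every input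
-- of the domain; nothing about fuel sufficiency is claimed or proved).
def pvFuel (wine : Int) (bottle : Int) (lid : Int) : Nat :=
  8 * wine.natAbs + 4 * bottle.natAbs + 2 * lid.natAbs + 16

-- ===== PORT A =====
def for_wineGo : Nat → Int → Int → Int → Int → Int
  | 0, s, _, _, _ => s
  | fuel + 1, s, w, b, l =>
    if w = 0 ∧ PySem.Int.floordiv b 2 = 0 ∧ PySem.Int.floordiv l 4 = 0 then s
    else if w ≠ 0 then for_wineGo fuel (s + w) 0 (b + w) (l + w)
    else if PySem.Int.floordiv b 2 ≠ 0 then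
      for_wineGo fuel s (w + PySem.Int.floordiv b 2) (PySem.Int.mod b 2) l
    else for_wineGo fuel s (w + PySem.Int.floordiv l 4) b (PySem.Int.mod l 4)

def for_wine (sum : Int) (wine : Int) (bottle : Int) (lid : Int) : Int :=
  for_wineGo (pvFuel wine bottle lid) sum wine bottle lid

-- ===== PORT B =====
def forWineDone (st : Int × Int × Int × Int) : Bool :=
  st.2.1 == 0 && PySem.Int.floordiv st.2.2.1 2 == 0 && PySem.Int.floordiv st.2.2.2 4 == 0

def forWineStep (st : Int × Int × Int × Int) : Int × Int × Int × Int :=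
  if st.2.1 ≠ 0 then (st.1 + st.2.1, 0, st.2.2.1 + st.2.1, st.2.2.2 + st.2.1)
  else if PySem.Int.floordiv st.2.2.1 2 ≠ 0 then
    (st.1, st.2.1 + PySem.Int.floordiv st.2.2.1 2, PySem.Int.mod st.2.2.1 2, st.2.2.2)
  else (st.1, st.2.1 + PySem.Int.floordiv st.2.2.2 4, st.2.2.1, PySem.Int.mod st.2.2.2 4)

def forWineLoop : Nat → Int × Int × Int × Int → Int × Int × Int × Int
  | 0, st => st
  | fuel + 1, st => if forWineDone st then st else forWineLoop fuel (forWineStep st)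

def for_wine_alt (sum : Int) (wine : Int) (bottle : Int) (lid : Int) : Int :=
  (forWineLoop (pvFuel wine bottle lid) (sum, wine, bottle, lid)).1

-- ===== PRECONDITION & SPEC =====
def Spec_for_wine (sum : Int) (wine : Int) (bottle : Int) (lid : Int) (out : Int) : Prop := out = for_wine_alt sum wine bottle lid
instance (sum : Int) (wine : Int) (bottle : Int) (lid : Int) (out : Int) : Decidable (Spec_for_wine sum wine bottle lid out) := by unfold Spec_for_wine; infer_instance

-- ===== CLAIM (what is proved, stated in full; the proofs are below) =====
def Claim_equal_for_wine : Prop := ∀ (sum : Int) (wine : Int) (bottle : Int) (lid : Int), Dom_for_wine sum wine bottle lid → Spec_for_wine sum wine bottle lid (for_wine sum wine bottle lid)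

-- ===== LEMMAS AND PROOFS =====

theorem fdiv2 (a : Int) : PySem.Int.floordiv a 2 = a / 2 :=
  PySem.Int.floordiv_eq_ediv_of_pos (by omega)
theorem fdiv4 (a : Int) : PySem.Int.floordiv a 4 = a / 4 :=
  PySem.Int.floordiv_eq_ediv_of_pos (by omega)
theorem fmod2 (a : Int) : PySem.Int.mod a 2 = a % 2 :=
  PySem.Int.mod_eq_emod_of_pos (by omega)
theorem fmod4 (a : Int) : PySem.Int.mod a 4 = a % 4 :=
  PySem.Int.mod_eq_emod_of_pos (by omega)

theorem go_eq_loop (fuel : Nat) :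
    ∀ (s w b l : Int),
    for_wineGo fuel s w b l = (forWineLoop fuel (s, w, b, l)).1 := by
  induction fuel with
  | zero => intro s w b l; rfl
  | succ fuel ih =>
    intro s w b l
    rw [for_wineGo, forWineLoop]
    simp only [fdiv2, fdiv4, fmod2, fmod4]
    by_cases hdead : w = 0 ∧ b / 2 = 0 ∧ l / 4 = 0
    · have hd : forWineDone (s, w, b, l) = true := by
        simp [forWineDone, hdead.1, hdead.2.1, hdead.2.2]
      rw [if_pos hdead, if_pos hd]
    · have hd : ¬ forWineDone (s, w, b, l) = true := by
        simp only [forWineDone, fdiv2, fdiv4, Bool.and_eq_true, beq_iff_eq]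
        intro h
        exact hdead ⟨h.1.1, h.1.2, h.2⟩
      rw [if_neg hdead, if_neg hd]
      by_cases hw : w ≠ 0
      · have hstep : forWineStep (s, w, b, l) = (s + w, 0, b + w, l + w) := by
          simp [forWineStep, hw]
        rw [if_pos hw, hstep, ih]
      · simp only [not_not] at hw
        subst hw
        by_cases hb : b / 2 ≠ 0
        · have hstep : forWineStep (s, 0, b, l) = (s, 0 + b / 2, b % 2, l) := by
            simp [forWineStep, hb]
          rw [if_neg (by simp), if_pos hb, hstep, ih]
        · have hstep : forWineStep (s, 0, b, l) = (s, 0 + l / 4, b, l % 4) := by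
            simp only [not_not] at hb
            simp [forWineStep, hb]
          rw [if_neg (by simp), if_neg hb, hstep, ih]

-- ===== VERDICT (by name: the statement is the Claim_ definition above) =====
theorem for_wine_spec : Claim_equal_for_wine := by
  intro s w b l _
  unfold Spec_for_wine for_wine for_wine_alt
  exact go_eq_loop (pvFuel w b l) s w b l
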